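-- pv_equiv track=rewrite | github.com/alexaoh/algdat | Exercise8/compatibility_graph.py | compatibility_graph
-- ===== SOURCE A (Python) =====
-- def compatibility_graph(donors, recipients, k):
--     donor_edges = []
--     for donor in range(len(donors)):
--         donor_edges.append([])
--         for recipient in range(len(recipients)):
--             count = 0
--             for att in range(len(recipients[recipient])):
--                 if donors[donor][att] == recipients[recipient][att]:
--                     count += 1
--             if count >= k:
--                 donor_edges[donor].append(recipient)
--
--     return donor_edges
-- ===== SOURCE B (Python) =====
-- def compatibility_graph(donors, recipients, k):
--     # Inverted index: for each attribute position, map value -> recipient indices.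
--     m = 0
--     for r in recipients:
--         if len(r) > m:
--             m = len(r)
--     buckets = []
--     for att in range(m):
--         b = {}
--         for j in range(len(recipients)):
--             r = recipients[j]
--             if att < len(r):
--                 b.setdefault(r[att], []).append(j)
--         buckets.append(b)
--     edges = []
--     for donor in donors:
--         counts = [0] * len(recipients)
--         for att in range(m):
--             for j in buckets[att].get(donor[att], []):
--                 counts[j] += 1
--         edges.append([j for j in range(len(recipients)) if counts[j] >= k])
--     return edges
-- ===== Notes on version B (the rewrite author's own statement) =====
-- stated objective: alternative
-- what changed: B precomputes an inverted index (per attribute position, a dict from value to recipient indices) and tallies per-donor match counts from the index buckets, instead of A's triple nested compare loop.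
import Mathlib
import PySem

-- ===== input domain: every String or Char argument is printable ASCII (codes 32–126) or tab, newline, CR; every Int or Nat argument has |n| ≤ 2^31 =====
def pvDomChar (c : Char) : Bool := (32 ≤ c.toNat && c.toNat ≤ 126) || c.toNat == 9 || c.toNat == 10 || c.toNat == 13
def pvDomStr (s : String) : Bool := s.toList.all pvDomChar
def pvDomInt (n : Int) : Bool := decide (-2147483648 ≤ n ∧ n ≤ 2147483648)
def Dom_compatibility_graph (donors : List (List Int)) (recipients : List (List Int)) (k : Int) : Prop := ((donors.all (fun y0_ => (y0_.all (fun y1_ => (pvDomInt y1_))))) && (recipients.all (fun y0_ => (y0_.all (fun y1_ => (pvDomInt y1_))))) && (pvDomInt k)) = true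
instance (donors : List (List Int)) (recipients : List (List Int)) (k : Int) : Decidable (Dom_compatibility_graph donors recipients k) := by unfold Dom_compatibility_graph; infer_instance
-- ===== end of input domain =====

-- B replaces A's triple nested compare loop by an inverted index (per attribute
-- position, a dict value -> recipient indices) and tallies match counts per donor
-- from the index buckets; same results, a different data structure (objective: alternative).

-- ===== PORT A =====
-- Literal port of A; indexing uses pyGetD/pySetD (the defaults are never read inside
-- Pre_, where every index is in range — Python A raises IndexError exactly outside Pre_).
def compatibility_graph (donors : List (List Int)) (recipients : List (List Int)) (k : Int) : List (List Int) :=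
  (PySem.List.pyRange 0 (donors.length : Int) 1).foldl (fun donor_edges donor =>
    let donor_edges := donor_edges ++ [[]]
    (PySem.List.pyRange 0 (recipients.length : Int) 1).foldl (fun donor_edges recipient =>
      let count : Int :=
        (PySem.List.pyRange 0 ((PySem.List.pyGetD recipients recipient []).length : Int) 1).foldl
          (fun count att =>
            if PySem.List.pyGetD (PySem.List.pyGetD donors donor []) att 0 =
               PySem.List.pyGetD (PySem.List.pyGetD recipients recipient []) att 0
            then count + 1 else count) 0
      if count ≥ k then
        PySem.List.pySetD donor_edges donor (PySem.List.pyGetD donor_edges donor [] ++ [recipient])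
      else donor_edges) donor_edges) []

-- ===== PORT B =====
-- Literal port of Source B (helpers name Source B's local steps: the running maximum m, the
-- per-attribute bucket dict, the bucket list, and the per-donor counts loop).
def pvAltM (recipients : List (List Int)) : Int :=
  recipients.foldl (fun m r => if (r.length : Int) > m then (r.length : Int) else m) 0

-- the inner loop of Source B building one bucket dict (setdefault(..).append -> Dict.modify)
def pvMkb (recipients : List (List Int)) (att : Int) : PySem.Dict Int (List Int) :=
  (PySem.List.pyRange 0 (recipients.length : Int) 1).foldl (fun b j =>
    if att < ((PySem.List.pyGetD recipients j []).length : Int) then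
      PySem.Dict.modify b (PySem.List.pyGetD (PySem.List.pyGetD recipients j []) att 0) [] (· ++ [j])
    else b) PySem.Dict.empty


def pvAltBuckets (recipients : List (List Int)) (m : Int) : List (PySem.Dict Int (List Int)) :=
  (PySem.List.pyRange 0 m 1).foldl (fun buckets att => buckets ++ [pvMkb recipients att]) []

def pvAltCounts (recipients : List (List Int)) (buckets : List (PySem.Dict Int (List Int)))
    (m : Int) (donor : List Int) : List Int :=
  (PySem.List.pyRange 0 m 1).foldl (fun counts att =>
    (PySem.Dict.getD (PySem.List.pyGetD buckets att PySem.Dict.empty)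
        (PySem.List.pyGetD donor att 0) []).foldl
      (fun counts j => PySem.List.pySetD counts j (PySem.List.pyGetD counts j 0 + 1)) counts)
    (List.replicate recipients.length 0)

def compatibility_graph_alt (donors : List (List Int)) (recipients : List (List Int)) (k : Int) : List (List Int) :=
  let m := pvAltM recipients
  let buckets := pvAltBuckets recipients m
  donors.foldl (fun edges donor =>
    let counts := pvAltCounts recipients buckets m donor
    edges ++ [(PySem.List.pyRange 0 (recipients.length : Int) 1).filter
      (fun j => PySem.List.pyGetD counts j 0 ≥ k)]) []

-- ===== PRECONDITION & SPEC =====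
-- Pre_ excludes exactly the ragged inputs (some recipient longer than some donor)
-- on which Python A raises IndexError.
def Pre_compatibility_graph (donors : List (List Int)) (recipients : List (List Int)) (k : Int) : Prop :=
  ∀ d ∈ donors, ∀ r ∈ recipients, r.length ≤ d.length
instance (donors : List (List Int)) (recipients : List (List Int)) (k : Int) : Decidable (Pre_compatibility_graph donors recipients k) := by unfold Pre_compatibility_graph; infer_instance

def pvWitness_compatibility_graph : List (List Int) × List (List Int) × Int :=
  ([[1, 2, 3], [0, 2, 0]], [[1, 2], [0, 0]], 1)

def Spec_compatibility_graph (donors : List (List Int)) (recipients : List (List Int)) (k : Int) (out : List (List Int)) : Prop := out = compatibility_graph_alt donors recipients k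
instance (donors : List (List Int)) (recipients : List (List Int)) (k : Int) (out : List (List Int)) : Decidable (Spec_compatibility_graph donors recipients k out) := by unfold Spec_compatibility_graph; infer_instance

-- ===== CLAIM (what is proved, stated in full; the proofs are below) =====
def Claim_equal_compatibility_graph : Prop := ∀ (donors : List (List Int)) (recipients : List (List Int)) (k : Int), Dom_compatibility_graph donors recipients k → Pre_compatibility_graph donors recipients k → Spec_compatibility_graph donors recipients k (compatibility_graph donors recipients k)

-- ===== LEMMAS AND PROOFS =====

-- the common reference value: for donor row d, the matching-attribute count with
-- recipient r, and the resulting edge list of one donor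
def pvCnt (d r : List Int) : Int :=
  ((PySem.List.pyRange 0 (r.length : Int) 1).countP
    (fun att => decide (PySem.List.pyGetD d att 0 = PySem.List.pyGetD r att 0)) : Int)

def pvRow (recipients : List (List Int)) (k : Int) (d : List Int) : List Int :=
  (PySem.List.pyRange 0 (recipients.length : Int) 1).filter
    (fun j => pvCnt d (PySem.List.pyGetD recipients j []) ≥ k)

-- middle loop: appending matching recipients to the last row
theorem pv_middle (L : List Int) (front : List (List Int)) (cond : Int → Prop) [DecidablePred cond] :
    ∀ cur : List Int,
      L.foldl (fun es j => if cond j then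
          PySem.List.pySetD es (front.length : Int) (PySem.List.pyGetD es (front.length : Int) [] ++ [j])
        else es) (front ++ [cur])
      = front ++ [cur ++ L.filter (fun j => decide (cond j))] := by
  induction L with
  | nil => intro cur; simp
  | cons j L ih =>
    intro cur
    simp only [List.foldl_cons, List.filter_cons]
    by_cases h : cond j
    · have hget : PySem.List.pyGetD (front ++ [cur]) (front.length : Int) [] = cur := by
        simp [PySem.List.pyGetD_natCast, List.getD]
      have hset : PySem.List.pySetD (front ++ [cur]) (front.length : Int) (cur ++ [j]) = front ++ [cur ++ [j]] := by
        rw [PySem.List.pySetD_natCast, List.set_append_right _ _ (le_refl _)]; simp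
      simp only [h, if_pos, hget, hset]
      rw [ih (cur ++ [j])]
      simp
    · rw [if_neg h, ih cur]; simp [h]


-- outer loop of A
theorem pv_outer (donors recipients : List (List Int)) (k : Int) :
    ∀ (n : Nat) (a b : Int), (b - a).toNat = n → ∀ (es : List (List Int)), (es.length : Int) = a →
      (PySem.List.pyRange a b 1).foldl (fun donor_edges donor =>
        (PySem.List.pyRange 0 (recipients.length : Int) 1).foldl (fun donor_edges recipient =>
          if (PySem.List.pyRange 0 ((PySem.List.pyGetD recipients recipient []).length : Int) 1).foldl
              (fun count att =>
                if PySem.List.pyGetD (PySem.List.pyGetD donors donor []) att 0 =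
                   PySem.List.pyGetD (PySem.List.pyGetD recipients recipient []) att 0
                then count + 1 else count) (0:Int) ≥ k then
            PySem.List.pySetD donor_edges donor (PySem.List.pyGetD donor_edges donor [] ++ [recipient])
          else donor_edges) (donor_edges ++ [[]])) es
      = es ++ (PySem.List.pyRange a b 1).map (fun i => pvRow recipients k (PySem.List.pyGetD donors i [])) := by
  intro n
  induction n with
  | zero =>
    intro a b h es _
    rw [show PySem.List.pyRange a b 1 = [] from PySem.List.pyRange_one_eq_nil (by omega)]
    simp
  | succ n ih =>
    intro a b h es hlen
    by_cases hba : b ≤ a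
    · rw [show PySem.List.pyRange a b 1 = [] from PySem.List.pyRange_one_eq_nil hba]
      simp
    · have hab : a < b := by omega
      rw [show PySem.List.pyRange a b 1 = a :: PySem.List.pyRange (a+1) b 1 from
        PySem.List.pyRange_one_cons hab]
      simp only [List.foldl_cons, List.map_cons]
      have hstep : (PySem.List.pyRange 0 (recipients.length : Int) 1).foldl (fun donor_edges recipient =>
          if (PySem.List.pyRange 0 ((PySem.List.pyGetD recipients recipient []).length : Int) 1).foldl
              (fun count att =>
                if PySem.List.pyGetD (PySem.List.pyGetD donors a []) att 0 =
                   PySem.List.pyGetD (PySem.List.pyGetD recipients recipient []) att 0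
                then count + 1 else count) (0:Int) ≥ k then
            PySem.List.pySetD donor_edges a (PySem.List.pyGetD donor_edges a [] ++ [recipient])
          else donor_edges) (es ++ [[]])
          = es ++ [pvRow recipients k (PySem.List.pyGetD donors a [])] := by
        subst hlen
        simp only [PySem.List.foldl_ite_add_one, zero_add]
        have hm := pv_middle (PySem.List.pyRange 0 (recipients.length : Int) 1) es
          (fun j => pvCnt (PySem.List.pyGetD donors (es.length : Int) [])
            (PySem.List.pyGetD recipients j []) ≥ k) []
        simpa [pvRow, pvCnt] using hm
      rw [hstep]
      rw [ih (a+1) b (by omega) (es ++ [pvRow recipients k (PySem.List.pyGetD donors a [])]) (by simp; omega)]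
      simp

theorem compatibility_graph_eq_map (donors recipients : List (List Int)) (k : Int) :
    compatibility_graph donors recipients k = donors.map (pvRow recipients k) := by
  unfold compatibility_graph
  rw [pv_outer donors recipients k ((donors.length : Int) - 0).toNat 0 (donors.length : Int) rfl [] (by simp)]
  rw [show (fun i => pvRow recipients k (PySem.List.pyGetD donors i [])) =
      (pvRow recipients k) ∘ (fun i => PySem.List.pyGetD donors i []) from rfl]
  rw [← List.map_map, PySem.List.map_pyGetD_pyRange_zero']
  simp

theorem pvMkb_getD (recipients : List (List Int)) (att v : Int) :
    (pvMkb recipients att).getD v []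
    = (PySem.List.pyRange 0 (recipients.length : Int) 1).filter (fun j =>
        decide (att < ((PySem.List.pyGetD recipients j []).length : Int)) &&
        (PySem.List.pyGetD (PySem.List.pyGetD recipients j []) att 0 == v)) := by
  unfold pvMkb
  rw [PySem.List.foldl_ite_eq_foldl_filter]
  rw [show ((PySem.List.pyRange 0 (recipients.length : Int) 1).filter (fun j =>
        decide (att < ((PySem.List.pyGetD recipients j []).length : Int)))).foldl
      (fun b j => PySem.Dict.modify b (PySem.List.pyGetD (PySem.List.pyGetD recipients j []) att 0) [] (· ++ [j]))
      PySem.Dict.empty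
    = (((PySem.List.pyRange 0 (recipients.length : Int) 1).filter (fun j =>
        decide (att < ((PySem.List.pyGetD recipients j []).length : Int)))).map
        (fun j => (PySem.List.pyGetD (PySem.List.pyGetD recipients j []) att 0, j))).foldl
      (fun b p => PySem.Dict.modify b p.1 [] (· ++ [p.2])) PySem.Dict.empty
    from by rw [List.foldl_map]]
  rw [PySem.Dict.getD_foldl_modify_append]
  rw [List.filter_map]
  simp [Function.comp, List.filter_filter, Bool.and_comm]
  exact congrFun (congrArg List.map (rfl :
    ((fun x : Int × Int => x.2) ∘ fun j => (PySem.List.pyGetD (PySem.List.pyGetD recipients j []) att 0, j)) = id)) _ ▸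
    (List.map_id _)

theorem pvInc_len (js : List Int) : ∀ counts : List Int,
    (js.foldl (fun counts j => PySem.List.pySetD counts j (PySem.List.pyGetD counts j 0 + 1)) counts).length
    = counts.length := by
  induction js with
  | nil => intro counts; rfl
  | cons j js ih => intro counts; simp [List.foldl_cons, ih, PySem.List.length_pySetD]

theorem pvInc_getD (js : List Int) : ∀ (counts : List Int),
    (∀ j ∈ js, 0 ≤ j ∧ j < (counts.length : Int)) →
    ∀ (j' : Int), 0 ≤ j' → j' < (counts.length : Int) →
    PySem.List.pyGetD
      (js.foldl (fun counts j => PySem.List.pySetD counts j (PySem.List.pyGetD counts j 0 + 1)) counts) j' 0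
    = PySem.List.pyGetD counts j' 0 + (js.count j' : Int) := by
  induction js with
  | nil => intro counts _ j' _ _; simp
  | cons j js ih =>
    intro counts hjs j' h0 h1
    simp only [List.foldl_cons]
    have hj := hjs j (by simp)
    have hlen : (PySem.List.pySetD counts j (PySem.List.pyGetD counts j 0 + 1)).length = counts.length :=
      PySem.List.length_pySetD ..
    rw [ih _ (fun x hx => by rw [hlen]; exact hjs x (by simp [hx])) j' h0 (by rw [hlen]; exact h1)]
    rw [PySem.List.pySetD_of_nonneg _ _ hj.1]
    rw [PySem.List.pyGetD_eq_getElem _ _ h0 (by simpa using h1),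
        PySem.List.pyGetD_eq_getElem _ _ hj.1 hj.2,
        PySem.List.pyGetD_eq_getElem _ _ h0 h1]
    rw [List.getElem_set]
    rw [List.count_cons]
    by_cases h : j.toNat = j'.toNat
    · have hjj : j = j' := by omega
      simp [hjj]
      omega
    · simp [h]
      omega

theorem pvCounts_final (recipients : List (List Int)) (d : List Int) (m : Int) :
    ∀ (atts : List Int), (∀ att ∈ atts, 0 ≤ att ∧ att < m) →
    ∀ (counts : List Int), counts.length = recipients.length →
    ∀ (j' : Int), 0 ≤ j' → j' < (recipients.length : Int) →
    PySem.List.pyGetD (atts.foldl (fun counts att =>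
        (PySem.Dict.getD
            (PySem.List.pyGetD ((PySem.List.pyRange 0 m 1).map (pvMkb recipients)) att PySem.Dict.empty)
            (PySem.List.pyGetD d att 0) []).foldl
          (fun counts j => PySem.List.pySetD counts j (PySem.List.pyGetD counts j 0 + 1)) counts) counts) j' 0
    = PySem.List.pyGetD counts j' 0 +
      ((atts.filter (fun att => decide (att < ((PySem.List.pyGetD recipients j' []).length : Int)) &&
          (PySem.List.pyGetD (PySem.List.pyGetD recipients j' []) att 0 == PySem.List.pyGetD d att 0))).length : Int) := by
  intro atts
  induction atts with
  | nil => intro _ counts _ j' _ _; simp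
  | cons att atts ih =>
    intro hatts counts hcl j' h0 h1
    have hatt := hatts att (by simp)
    simp only [List.foldl_cons]
    have hb : PySem.List.pyGetD ((PySem.List.pyRange 0 m 1).map (pvMkb recipients)) att PySem.Dict.empty
        = pvMkb recipients att :=
      PySem.List.pyGetD_map_pyRange_of_nonneg _ m att _ hatt.1 hatt.2
    rw [hb, pvMkb_getD]
    set p : Int → Bool := fun x => decide (att < ((PySem.List.pyGetD recipients x []).length : Int)) &&
        (PySem.List.pyGetD (PySem.List.pyGetD recipients x []) att 0 == PySem.List.pyGetD d att 0) with hp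
    set js := (PySem.List.pyRange 0 (recipients.length : Int) 1).filter p with hjs
    have hlen1 : (js.foldl (fun counts j => PySem.List.pySetD counts j (PySem.List.pyGetD counts j 0 + 1)) counts).length
        = counts.length := pvInc_len ..
    rw [ih (fun x hx => hatts x (by simp [hx])) _ (by rw [hlen1, hcl]) j' h0 h1]
    rw [pvInc_getD js counts
      (fun x hx => by
        have : x ∈ PySem.List.pyRange 0 (recipients.length : Int) 1 := List.mem_of_mem_filter hx
        rw [PySem.List.mem_pyRange_one] at this
        constructor
        · exact this.1
        · rw [hcl]; exact this.2) j' h0 (by rw [hcl]; exact h1)]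
    have hcount : (js.count j' : Int) = if p j' then 1 else 0 := by
      by_cases hpj : p j' = true
      · rw [hjs, List.count_filter hpj, if_pos hpj]
        rw [List.count_eq_one_of_mem (PySem.List.nodup_pyRange_one ..)
          (by rw [PySem.List.mem_pyRange_one]; exact ⟨h0, h1⟩)]
        simp
      · rw [if_neg hpj]
        have : j' ∉ js := fun hmem => hpj (List.of_mem_filter hmem)
        rw [List.count_eq_zero_of_not_mem this]
        simp
    rw [hcount, List.filter_cons]
    have hsame : (decide (att < ((PySem.List.pyGetD recipients j' []).length : Int)) &&
        (PySem.List.pyGetD (PySem.List.pyGetD recipients j' []) att 0 == PySem.List.pyGetD d att 0)) = p j' := rfl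
    rw [hsame]
    by_cases hpj : p j' = true
    · rw [if_pos hpj, if_pos hpj]
      push_cast [List.length_cons]
      omega
    · rw [if_neg hpj, if_neg hpj]
      omega

theorem pvAltM_bounds (recipients : List (List Int)) :
    0 ≤ pvAltM recipients ∧ ∀ r ∈ recipients, (r.length : Int) ≤ pvAltM recipients := by
  unfold pvAltM
  rw [PySem.List.foldl_congr_mem recipients _ (fun acc r => max acc ((r.length : Int))) 0
    (fun acc x _ => by simp only [max_def]; split_ifs <;> omega)]
  exact ⟨(PySem.List.le_foldl_max_int ..).1, (PySem.List.le_foldl_max_int ..).2⟩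

theorem pvFilter_len_eq_pvCnt (d r : List Int) (m : Int) (hm : (r.length : Int) ≤ m) :
    (((PySem.List.pyRange 0 m 1).filter (fun att => decide (att < (r.length : Int)) &&
        (PySem.List.pyGetD r att 0 == PySem.List.pyGetD d att 0))).length : Int)
    = pvCnt d r := by
  rw [PySem.List.pyRange_one_append 0 (r.length : Int) m (by positivity) hm]
  rw [List.filter_append, List.length_append]
  have h2 : (PySem.List.pyRange (r.length : Int) m 1).filter (fun att => decide (att < (r.length : Int)) &&
      (PySem.List.pyGetD r att 0 == PySem.List.pyGetD d att 0)) = [] := by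
    rw [List.filter_eq_nil_iff]
    intro a ha
    rw [PySem.List.mem_pyRange_one] at ha
    simp only [Bool.and_eq_true, decide_eq_true_eq, not_and]
    intro h
    omega
  have h1 : (PySem.List.pyRange 0 (r.length : Int) 1).filter (fun att => decide (att < (r.length : Int)) &&
      (PySem.List.pyGetD r att 0 == PySem.List.pyGetD d att 0))
      = (PySem.List.pyRange 0 (r.length : Int) 1).filter
        (fun att => decide (PySem.List.pyGetD d att 0 = PySem.List.pyGetD r att 0)) := by
    apply List.filter_congr
    intro a ha
    rw [PySem.List.mem_pyRange_one] at ha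
    simp only [ha.2, decide_true, Bool.true_and]
    rw [Bool.eq_iff_iff]
    simp only [beq_iff_eq, decide_eq_true_eq]
    exact eq_comm
  rw [h1, h2]
  simp [pvCnt, List.countP_eq_length_filter]

theorem pvAltBuckets_eq_map (recipients : List (List Int)) (m : Int) :
    pvAltBuckets recipients m = (PySem.List.pyRange 0 m 1).map (pvMkb recipients) := by
  unfold pvAltBuckets
  rw [PySem.List.foldl_append_singleton_eq_map]
  simp

theorem compatibility_graph_alt_eq_map (donors recipients : List (List Int)) (k : Int) :
    compatibility_graph_alt donors recipients k = donors.map (pvRow recipients k) := by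
  simp only [compatibility_graph_alt]
  rw [PySem.List.foldl_append_singleton_eq_map]
  simp only [List.nil_append]
  apply List.map_congr_left
  intro d _
  unfold pvRow
  apply List.filter_congr
  intro j hj
  rw [PySem.List.mem_pyRange_one] at hj
  have hcounts : PySem.List.pyGetD
      (pvAltCounts recipients (pvAltBuckets recipients (pvAltM recipients)) (pvAltM recipients) d) j 0
      = pvCnt d (PySem.List.pyGetD recipients j []) := by
    unfold pvAltCounts
    rw [pvAltBuckets_eq_map]
    rw [pvCounts_final recipients d (pvAltM recipients) _
      (fun att hatt => by rw [PySem.List.mem_pyRange_one] at hatt; exact hatt) _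
      (List.length_replicate ..) j hj.1 hj.2]
    have hz : PySem.List.pyGetD (List.replicate recipients.length (0:Int)) j 0 = 0 := by
      rw [PySem.List.pyGetD_eq_getElem _ _ hj.1 (by simpa using hj.2)]
      simp
    rw [hz, zero_add]
    exact pvFilter_len_eq_pvCnt d (PySem.List.pyGetD recipients j []) (pvAltM recipients)
      ((pvAltM_bounds recipients).2 _ (PySem.List.pyGetD_mem _ _ ⟨by omega, hj.2⟩))
  rw [hcounts]

-- ===== VERDICT (by name: the statement is the Claim_ definition above) =====
theorem compatibility_graph_spec : Claim_equal_compatibility_graph := by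
  intro donors recipients k _ _
  unfold Spec_compatibility_graph
  rw [compatibility_graph_eq_map, compatibility_graph_alt_eq_map]
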